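-- pv_equiv track=rewrite | github.com/tektronix/keithley | Instrument_Examples/Series_2280S/Battery_Simulator/Series_2281S_Battery_Simulator_Datalogger.py | CV_or_CC
-- ===== SOURCE A (Python) =====
-- def CV_or_CC(lst):
--     x = 0
--     CV = 0
--     CC = 0
--     while x < len(lst):
--         if str(lst[x]) == "CV":
--             CV = CV + 1
--         elif str(lst[x]) == "CC":
--             CC = CC + 1
--         else:
--             CV = CV + 1
--         x = x + 1
--
--     if CV == CC:
--         return "CV"
--     elif CC < CV:
--         return "CV"
--     else:
--         return "CC"
-- ===== SOURCE B (Python) =====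
-- def CV_or_CC(lst):
--     # Sort the coerced labels; the middle element of a sorted two-valued list
--     # is the strict majority ("CC" only when CCs occupy more than half),
--     # and on a tie/empty the answer is "CV".
--     labels = sorted("CC" if str(e) == "CC" else "CV" for e in lst)
--     return labels[len(labels) // 2] if labels else "CV"
-- ===== Notes on version B (the rewrite author's own statement) =====
-- stated objective: alternative
-- what changed: B replaces A's counter loop and three-way comparison by sort-and-median: it sorts the coerced labels and returns the middle element of the sorted list (the median of a two-valued list is the strict majority, and a tie or empty list yields CV).
import Mathlib
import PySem

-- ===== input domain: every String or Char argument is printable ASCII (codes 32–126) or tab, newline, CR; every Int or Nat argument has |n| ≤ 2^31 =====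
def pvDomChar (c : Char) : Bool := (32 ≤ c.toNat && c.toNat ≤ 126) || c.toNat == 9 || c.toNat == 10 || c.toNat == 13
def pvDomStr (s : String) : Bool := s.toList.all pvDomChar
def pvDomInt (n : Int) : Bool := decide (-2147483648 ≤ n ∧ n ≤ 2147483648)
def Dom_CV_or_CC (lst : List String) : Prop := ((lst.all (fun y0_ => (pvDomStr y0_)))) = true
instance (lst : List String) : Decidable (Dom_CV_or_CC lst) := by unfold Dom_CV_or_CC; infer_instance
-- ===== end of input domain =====

-- B replaces A's counter loop and three-way comparison by sort-and-median over the coerced labels (alternative algorithm, same return value).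


-- ===== PORT A =====
-- A's while-loop: index x with counters CV, CC
def CV_or_CC_loop (lst : List String) (x CV CC : Nat) : Nat × Nat :=
  if h : x < lst.length then
    if lst[x] == "CV" then CV_or_CC_loop lst (x + 1) (CV + 1) CC
    else if lst[x] == "CC" then CV_or_CC_loop lst (x + 1) CV (CC + 1)
    else CV_or_CC_loop lst (x + 1) (CV + 1) CC
  else (CV, CC)
termination_by lst.length - x

def CV_or_CC (lst : List String) : String :=
  let p := CV_or_CC_loop lst 0 0 0
  if p.1 == p.2 then "CV"
  else if p.2 < p.1 then "CV"
  else "CC"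

-- ===== PORT B =====
-- sort the coerced labels, return the middle element of the sorted list ("CV" if empty)
def CV_or_CC_alt (lst : List String) : String :=
  let labels := PySem.List.sorted (lst.map (fun e => if e == "CC" then "CC" else "CV")) (fun x => x) false
  if hne : labels = [] then "CV"
  else labels[labels.length / 2]'(Nat.div_lt_self (List.length_pos_iff.mpr hne) (by norm_num))

-- ===== PRECONDITION & SPEC =====
def Spec_CV_or_CC (lst : List String) (out : String) : Prop := out = CV_or_CC_alt lst
instance (lst : List String) (out : String) : Decidable (Spec_CV_or_CC lst out) := by unfold Spec_CV_or_CC; infer_instance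

-- ===== CLAIM (what is proved, stated in full; the proofs are below) =====
def Claim_equal_CV_or_CC : Prop := ∀ (lst : List String), Dom_CV_or_CC lst → Spec_CV_or_CC lst (CV_or_CC lst)

-- ===== LEMMAS AND PROOFS =====

-- A's loop counts CC and everything-else (A's "CV" bucket)
theorem CV_or_CC_loop_eq (lst : List String) (x CV CC : Nat) :
    CV_or_CC_loop lst x CV CC =
      (CV + (lst.drop x).countP (fun e => !(e == "CC")),
       CC + (lst.drop x).countP (fun e => e == "CC")) := by
  induction x, CV, CC using CV_or_CC_loop.induct lst with
  | case1 x CV CC h h1 ih =>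
      rw [CV_or_CC_loop]
      simp only [h, dif_pos, h1, if_pos]
      have hcc : (lst[x] == "CC") = false := by
        rw [beq_eq_false_iff_ne]; intro hc; rw [hc] at h1; simp at h1
      rw [ih, List.drop_eq_getElem_cons h, List.countP_cons, List.countP_cons]
      simp [hcc]; omega
  | case2 x CV CC h h1 h2 ih =>
      rw [CV_or_CC_loop]
      simp only [h, dif_pos, h1, h2, if_pos]
      rw [ih, List.drop_eq_getElem_cons h, List.countP_cons, List.countP_cons]
      simp [h2]; omega
  | case3 x CV CC h h1 h2 ih =>
      rw [CV_or_CC_loop]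
      simp only [h, dif_pos, h1, h2]
      have hcc : (lst[x] == "CC") = false := by simpa using h2
      rw [ih, List.drop_eq_getElem_cons h, List.countP_cons, List.countP_cons]
      simp [hcc]; omega
  | case4 x CV CC h =>
      rw [CV_or_CC_loop]
      have hnil : lst.drop x = [] := List.drop_eq_nil_of_le (by omega)
      simp [h, hnil]

-- the coerced-label list is a permutation of (cc copies of "CC") ++ (cv copies of "CV")
theorem map_label_perm (lst : List String) :
    (lst.map (fun e => if e == "CC" then "CC" else "CV")).Perm
      (List.replicate (lst.countP (fun e => e == "CC")) "CC" ++
       List.replicate (lst.countP (fun e => !(e == "CC"))) "CV") := by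
  induction lst with
  | nil => simp
  | cons a t ih =>
      by_cases h : a = "CC"
      · subst h
        simpa [List.replicate_succ] using ih.cons "CC"
      · have step := ih.cons "CV"
        have mid := (List.perm_middle (a := ("CV" : String))
          (l₁ := List.replicate (t.countP (fun e => e == "CC")) "CC")
          (l₂ := List.replicate (t.countP (fun e => !(e == "CC"))) "CV")).symm
        have := step.trans mid
        simpa [h, List.countP_cons, List.replicate_succ] using this

-- the sorted label list is exactly the "CC" block followed by the "CV" block
theorem sorted_label_eq (lst : List String) :
    PySem.List.sorted (lst.map (fun e => if e == "CC" then "CC" else "CV")) (fun x => x) false =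
      List.replicate (lst.countP (fun e => e == "CC")) "CC" ++
      List.replicate (lst.countP (fun e => !(e == "CC"))) "CV" := by
  apply PySem.List.sorted_id_eq_of_perm_of_pairwise
  · exact (map_label_perm lst).symm
  · apply List.pairwise_append.mpr
    refine ⟨List.pairwise_replicate.mpr (Or.inr (le_refl _)),
      List.pairwise_replicate.mpr (Or.inr (le_refl _)), ?_⟩
    intro a ha b hb
    rw [List.eq_of_mem_replicate ha, List.eq_of_mem_replicate hb]
    simp [String.le_iff_toList_le]; decide

theorem getElem_rep_rep (cc cv i : Nat)
    (h : i < (List.replicate cc ("CC" : String) ++ List.replicate cv "CV").length) :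
    (List.replicate cc ("CC" : String) ++ List.replicate cv "CV")[i] =
      if i < cc then "CC" else "CV" := by
  by_cases hi : i < cc
  · rw [List.getElem_append_left (by simpa using hi)]
    simp [hi]
  · rw [List.getElem_append_right (by simpa using hi)]
    simp [hi]

-- ===== VERDICT (by name: the statement is the Claim_ definition above) =====
theorem CV_or_CC_spec : Claim_equal_CV_or_CC := by
  intro lst _
  unfold Spec_CV_or_CC CV_or_CC CV_or_CC_alt
  rw [CV_or_CC_loop_eq]
  simp only [List.drop_zero, Nat.zero_add, sorted_label_eq]
  by_cases h0 : lst.countP (fun e => e == "CC") = 0 ∧ lst.countP (fun e => !(e == "CC")) = 0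
  · simp [h0.1, h0.2]
  · have hne : (List.replicate (lst.countP (fun e => e == "CC")) ("CC" : String) ++
        List.replicate (lst.countP (fun e => !(e == "CC"))) "CV") ≠ [] := by
      simp only [ne_eq, List.append_eq_nil_iff, List.replicate_eq_nil_iff]
      omega
    rw [dif_neg hne, getElem_rep_rep]
    simp only [List.length_append, List.length_replicate, beq_iff_eq]
    split_ifs <;> first | rfl | (exfalso; omega)
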